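-- pv_equiv track=rewrite | github.com/RusKrem/pythonP | Test/train.py | calculate_the_product
-- ===== SOURCE A (Python) =====
-- def calculate_the_product(new_list):
--     """
--     Calculates the product of the elements after the first negative element.
--     Outputs the source array and the result of calculations.
--     :param new_list: list
--     :return: int summ elements
--     """
--
--     list_slice = []
--     list_slice_summ = 0
--     for num in range(0, len(new_list)):
--         if new_list[num] < 0:
--             list_slice = new_list[num + 1 : ]
--             list_slice_summ = sum(new_list[num + 1 : ])
--             break
--
--     return f"List: {new_list}\nslice list: {list_slice}\nsumm elements: {list_slice_summ}."
-- ===== SOURCE B (Python) =====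
-- def calculate_the_product(new_list):
--     # One streaming pass with a flag: no index arithmetic, no break, no slicing.
--     found = False
--     list_slice = []
--     list_slice_summ = 0
--     for num in new_list:
--         if found:
--             list_slice.append(num)
--             list_slice_summ += num
--         elif num < 0:
--             found = True
--     return f"List: {new_list}\nslice list: {list_slice}\nsumm elements: {list_slice_summ}."
-- ===== Notes on version B (the rewrite author's own statement) =====
-- stated objective: simpler
-- what changed: Replaced the index loop with break plus two slice expressions by a single streaming pass over the elements that maintains a found flag and accumulates the tail list and its sum directly.
import Mathlib
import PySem

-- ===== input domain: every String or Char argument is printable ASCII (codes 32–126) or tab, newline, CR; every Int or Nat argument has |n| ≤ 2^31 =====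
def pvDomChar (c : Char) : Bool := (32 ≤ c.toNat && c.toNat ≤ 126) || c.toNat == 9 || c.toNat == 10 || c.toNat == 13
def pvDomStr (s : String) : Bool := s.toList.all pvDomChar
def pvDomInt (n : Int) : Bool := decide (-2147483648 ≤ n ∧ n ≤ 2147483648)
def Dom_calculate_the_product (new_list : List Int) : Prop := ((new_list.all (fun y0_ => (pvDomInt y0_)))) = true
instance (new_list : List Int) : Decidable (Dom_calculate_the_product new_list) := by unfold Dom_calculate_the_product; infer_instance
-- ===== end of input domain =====

-- B replaces A's index-loop-with-break plus slice/sum expressions by one streaming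
-- pass with a found flag that accumulates the tail list and its sum (objective: simpler).


-- Python's repr of a list of ints, as appearing in the (identical) f-string of A and B
def pyIntListRepr (l : List Int) : String :=
  "[" ++ PySem.Str.join ", " (l.map PySem.Int.toStr) ++ "]"

-- the f-string shared verbatim by A and B
def pvRender (new_list list_slice : List Int) (summ : Int) : String :=
  "List: " ++ pyIntListRepr new_list ++ "\nslice list: " ++ pyIntListRepr list_slice ++
  "\nsumm elements: " ++ PySem.Int.toStr summ ++ "."

-- ===== PORT A =====
-- A's loop 'for num in range(0, len(new_list)): if new_list[num] < 0: …; break'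
def pvALoop (l : List Int) (num : Nat) : List Int × Int :=
  if h : num < l.length then
    if l[num] < 0 then (l.drop (num + 1), (l.drop (num + 1)).sum)
    else pvALoop l (num + 1)
  else ([], 0)
termination_by l.length - num

def calculate_the_product (new_list : List Int) : String :=
  let r := pvALoop new_list 0
  pvRender new_list r.1 r.2

-- ===== PORT B =====
-- B's single streaming pass: state (found, list_slice, list_slice_summ)
def pvBStep (st : Bool × List Int × Int) (num : Int) : Bool × List Int × Int :=
  match st with
  | (found, slice, summ) =>
    if found then (found, slice ++ [num], summ + num)
    else if num < 0 then (true, slice, summ)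
    else (found, slice, summ)

def calculate_the_product_alt (new_list : List Int) : String :=
  let r := new_list.foldl pvBStep (false, [], 0)
  pvRender new_list r.2.1 r.2.2

-- ===== PRECONDITION & SPEC =====
def Spec_calculate_the_product (new_list : List Int) (out : String) : Prop := out = calculate_the_product_alt new_list
instance (new_list : List Int) (out : String) : Decidable (Spec_calculate_the_product new_list out) := by unfold Spec_calculate_the_product; infer_instance

-- ===== CLAIM (what is proved, stated in full; the proofs are below) =====
def Claim_equal_calculate_the_product : Prop := ∀ (new_list : List Int), Dom_calculate_the_product new_list → Spec_calculate_the_product new_list (calculate_the_product new_list)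

-- ===== LEMMAS AND PROOFS =====

-- A's loop, rephrased as structural recursion on the suffix it scans
def pvAFind : List Int → List Int × Int
  | [] => ([], 0)
  | x :: xs => if x < 0 then (xs, xs.sum) else pvAFind xs

theorem pvALoop_drop (l : List Int) (num : Nat) : pvALoop l num = pvAFind (l.drop num) := by
  generalize hs : l.drop num = s
  induction s generalizing num with
  | nil =>
    rw [pvALoop]
    have : ¬ num < l.length := by
      intro h
      rw [List.drop_eq_getElem_cons h] at hs
      exact List.cons_ne_nil _ _ hs
    simp [this, pvAFind]
  | cons x xs ih =>
    have hlt : num < l.length := by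
      by_contra h
      rw [List.drop_eq_nil_of_le (by omega)] at hs
      exact List.cons_ne_nil x xs hs.symm
    have hd : l.drop num = l[num] :: l.drop (num + 1) := List.drop_eq_getElem_cons hlt
    rw [hd] at hs
    have hx : l[num] = x := (List.cons.injEq _ _ _ _ ▸ hs).1
    have hxs : l.drop (num + 1) = xs := (List.cons.injEq _ _ _ _ ▸ hs).2
    rw [pvALoop]
    simp only [hlt, dif_pos, hx, hxs, pvAFind]
    by_cases hneg : x < 0
    · simp [hneg]
    · simp [hneg, ih (num + 1) hxs]

-- once found, B's fold just appends everything and adds it up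
theorem pvB_found (xs : List Int) (slice : List Int) (summ : Int) :
    xs.foldl pvBStep (true, slice, summ) = (true, slice ++ xs, summ + xs.sum) := by
  induction xs generalizing slice summ with
  | nil => simp
  | cons x xs ih =>
    simp only [List.foldl_cons, pvBStep, if_pos, List.sum_cons]
    rw [ih]
    simp [List.append_assoc, add_assoc]

-- the core equivalence: B's fold computes A's find-and-slice result
theorem pv_core (s : List Int) :
    s.foldl pvBStep (false, [], 0) = (s.any (· < 0), pvAFind s) := by
  induction s with
  | nil => simp [pvAFind]
  | cons x xs ih =>
    by_cases hneg : x < 0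
    · simp only [List.foldl_cons, pvBStep, Bool.false_eq_true, if_false, if_pos hneg]
      rw [pvB_found]
      simp [pvAFind, hneg]
    · simp only [List.foldl_cons, pvBStep, Bool.false_eq_true, if_false, if_neg hneg]
      rw [ih]
      simp [pvAFind, hneg]

-- ===== VERDICT (by name: the statement is the Claim_ definition above) =====
theorem calculate_the_product_spec : Claim_equal_calculate_the_product := by
  intro l _
  unfold Spec_calculate_the_product calculate_the_product calculate_the_product_alt
  rw [pv_core, pvALoop_drop]
  simp
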